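-- pv_equiv track=rewrite | github.com/Jetstibbe/Computer_Science_TypedMSMP- | msmp_typed_variants.py | filter_msmp_by_df
-- ===== SOURCE A (Python) =====
-- from typing import Dict, List, Sequence, Set, Tuple
--
-- def filter_msmp_by_df(
--     msmp_raw: List[Set[str]],
--     min_df: int = 1,
-- ) -> List[Set[str]]:
--     """
--     Document-frequency filtering over MSMP+ token sets.
--     """
--     from collections import Counter
--
--     freq = Counter()
--     for s in msmp_raw:
--         freq.update(s)
--     msmp_filtered: List[Set[str]] = []
--     for s in msmp_raw:
--         msmp_filtered.append({mw for mw in s if freq[mw] >= min_df})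
--     return msmp_filtered
-- ===== SOURCE B (Python) =====
-- def filter_msmp_by_df(msmp_raw, min_df=1):
--     from itertools import groupby
--     tokens = sorted(w for s in msmp_raw for w in s)
--     rare = {w for w, g in groupby(tokens) if sum(1 for _ in g) < min_df}
--     return [{w for w in s if w not in rare} for s in msmp_raw]
-- ===== Notes on version B (the rewrite author's own statement) =====
-- stated objective: alternative
-- what changed: B replaces the Counter hash-count pass by sort-then-scan: it sorts the flattened token stream, finds the rare tokens by measuring the lengths of consecutive equal runs with itertools.groupby, and removes those rare tokens from each document set.
import Mathlib
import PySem

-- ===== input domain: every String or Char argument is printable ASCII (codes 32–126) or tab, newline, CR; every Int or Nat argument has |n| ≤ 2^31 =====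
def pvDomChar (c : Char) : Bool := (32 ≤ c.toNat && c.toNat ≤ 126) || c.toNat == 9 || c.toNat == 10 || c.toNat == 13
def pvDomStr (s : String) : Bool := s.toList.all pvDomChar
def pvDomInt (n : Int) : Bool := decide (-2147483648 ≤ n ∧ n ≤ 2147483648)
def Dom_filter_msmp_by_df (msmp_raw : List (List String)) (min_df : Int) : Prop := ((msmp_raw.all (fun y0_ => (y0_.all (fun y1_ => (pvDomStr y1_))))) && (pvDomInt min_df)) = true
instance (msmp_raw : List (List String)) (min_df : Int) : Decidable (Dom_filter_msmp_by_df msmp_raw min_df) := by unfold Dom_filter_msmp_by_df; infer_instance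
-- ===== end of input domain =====

-- B finds the rare tokens by sorting the flattened token stream and scanning runs of
-- equal tokens (itertools.groupby) instead of A's Counter hash table; objective: alternative.

-- ===== PORT A =====
def filter_msmp_by_df (msmp_raw : List (List String)) (min_df : Int) : List (List String) :=
  -- freq = Counter(); for s in msmp_raw: freq.update(s)
  let freq : PySem.Dict String Int :=
    msmp_raw.foldl (fun d s => s.foldl (fun d x => d.modify x 0 (· + 1)) d) PySem.Dict.empty
  -- for s in msmp_raw: append {mw for mw in s if freq[mw] >= min_df}
  msmp_raw.foldl (fun acc s => acc ++ [s.filter (fun mw => min_df ≤ freq.getD mw 0)]) []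

-- ===== PORT B =====
-- itertools.groupby over a list: consecutive equal runs as (head, run length) pairs.
def pvRunCounts : List String → List (String × Int)
  | [] => []
  | x :: xs =>
      (x, 1 + ((xs.takeWhile (fun y => y == x)).length : Int))
        :: pvRunCounts (xs.dropWhile (fun y => y == x))
termination_by l => l.length
decreasing_by
  exact Nat.lt_succ_of_le (List.dropWhile_sublist _).length_le

def filter_msmp_by_df_alt (msmp_raw : List (List String)) (min_df : Int) : List (List String) :=
  -- tokens = sorted(w for s in msmp_raw for w in s)
  let tokens := PySem.List.sorted (msmp_raw.flatMap (fun s => s)) (fun w => w) false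
  -- rare = {w for w, g in groupby(tokens) if sum(1 for _ in g) < min_df}
  let rare : PySem.Set String :=
    PySem.Set.ofList (((pvRunCounts tokens).filter (fun p => p.2 < min_df)).map (·.1))
  -- [{w for w in s if w not in rare} for s in msmp_raw]
  msmp_raw.map (fun s => s.filter (fun w => !(PySem.Set.contains rare w)))

-- ===== PRECONDITION & SPEC =====
def Spec_filter_msmp_by_df (msmp_raw : List (List String)) (min_df : Int) (out : List (List String)) : Prop := out = filter_msmp_by_df_alt msmp_raw min_df
instance (msmp_raw : List (List String)) (min_df : Int) (out : List (List String)) : Decidable (Spec_filter_msmp_by_df msmp_raw min_df out) := by unfold Spec_filter_msmp_by_df; infer_instance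

-- ===== CLAIM (what is proved, stated in full; the proofs are below) =====
def Claim_equal_filter_msmp_by_df : Prop := ∀ (msmp_raw : List (List String)) (min_df : Int), Dom_filter_msmp_by_df msmp_raw min_df → Spec_filter_msmp_by_df msmp_raw min_df (filter_msmp_by_df msmp_raw min_df)

-- ===== LEMMAS AND PROOFS =====

-- A's nested counting loop computes the multiset count of the flattened token stream.
theorem nested_count_getD (msmp : List (List String)) (d : PySem.Dict String Int) (v : String) :
    (msmp.foldl (fun d s => s.foldl (fun d x => d.modify x 0 (· + 1)) d) d).getD v 0
      = d.getD v 0 + ((msmp.flatMap (fun s => s)).count v : Int) := by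
  induction msmp generalizing d with
  | nil => simp
  | cons s rest ih =>
    simp only [List.foldl_cons, List.flatMap_cons, List.count_append]
    rw [ih, PySem.Dict.getD_foldl_modify_add_one]
    push_cast
    ring

-- every first component produced by pvRunCounts is an element of the scanned list
theorem runCounts_fst_mem (l : List String) (p : String × Int) (hp : p ∈ pvRunCounts l) :
    p.1 ∈ l := by
  induction l using pvRunCounts.induct with
  | case1 => simp [pvRunCounts] at hp
  | case2 x xs ih =>
    rw [pvRunCounts] at hp
    rcases List.mem_cons.1 hp with h | h
    · subst h; exact List.mem_cons_self
    · exact List.mem_cons_of_mem x ((List.dropWhile_sublist _).mem (ih h))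

-- on a ≤-sorted list, membership in the rare-token list is exactly "occurs and count < min_df"
theorem runCounts_rare_mem (min_df : Int) (l : List String)
    (hs : l.Pairwise (· ≤ ·)) (w : String) :
    (w ∈ ((pvRunCounts l).filter (fun p => p.2 < min_df)).map (·.1))
      ↔ (w ∈ l ∧ (l.count w : Int) < min_df) := by
  induction l using pvRunCounts.induct with
  | case1 => simp [pvRunCounts]
  | case2 x xs ih =>
    have hsplit : xs = xs.takeWhile (fun y => y == x) ++ xs.dropWhile (fun y => y == x) :=
      (List.takeWhile_append_dropWhile).symm
    have htake : ∀ y ∈ xs.takeWhile (fun y => y == x), y = x := by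
      intro y hy
      simpa using List.mem_takeWhile_imp hy
    have hxxs : ∀ y ∈ xs, x ≤ y := (List.pairwise_cons.1 hs).1
    have hstail : xs.Pairwise (· ≤ ·) := (List.pairwise_cons.1 hs).2
    have hsdrop : (xs.dropWhile (fun y => y == x)).Pairwise (· ≤ ·) :=
      hstail.sublist (List.dropWhile_sublist _)
    -- x does not occur in the dropped tail (sortedness keeps equal tokens adjacent)
    have hxdrop : x ∉ xs.dropWhile (fun y => y == x) := by
      intro hmem
      cases hd : xs.dropWhile (fun y => y == x) with
      | nil => rw [hd] at hmem; exact (List.not_mem_nil) hmem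
      | cons h t =>
        have hne : ¬ (h == x) = true := by
          have := List.head?_dropWhile_not (fun y => y == x) xs
          rw [hd] at this; simpa using this
        have hhx : h ≠ x := by simpa using hne
        rw [hd] at hmem
        rcases List.mem_cons.1 hmem with h1 | h1
        · exact hhx h1.symm
        · have hht : (h :: t).Pairwise (· ≤ ·) := by rw [← hd]; exact hsdrop
          have h1' : h ≤ x := (List.pairwise_cons.1 hht).1 x h1
          have h2' : x ≤ h := hxxs h ((List.dropWhile_sublist _).mem (by rw [hd]; exact List.mem_cons_self))
          exact hhx (le_antisymm h1' h2')
    have hcountdrop : (xs.dropWhile (fun y => y == x)).count x = 0 :=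
      List.count_eq_zero.2 hxdrop
    have hcountx : ((x :: xs).count x : Int)
        = 1 + ((xs.takeWhile (fun y => y == x)).length : Int) := by
      rw [List.count_cons_self]
      conv_lhs => rw [hsplit]
      rw [List.count_append, hcountdrop, List.count_eq_length.2 (by intro y hy; exact ((htake y hy) ▸ rfl))]
      push_cast; ring
    rw [pvRunCounts]
    by_cases hwx : w = x
    · subst hwx
      constructor
      · intro h
        rw [List.filter_cons] at h
        refine ⟨List.mem_cons_self, ?_⟩
        by_cases hc : (1 + ((xs.takeWhile (fun y => y == w)).length : Int)) < min_df
        · rw [hcountx]; exact hc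
        · rw [if_neg (by simpa using hc)] at h
          rcases List.mem_map.1 h with ⟨p, hpmem, hpw⟩
          have := runCounts_fst_mem _ p (List.mem_filter.1 hpmem).1
          rw [hpw] at this
          exact absurd this hxdrop
      · intro ⟨_, hcnt⟩
        rw [hcountx] at hcnt
        rw [List.filter_cons, if_pos (by simpa using hcnt), List.map_cons]
        exact List.mem_cons_self
    · have hwtake : w ∉ xs.takeWhile (fun y => y == x) := fun h => hwx (htake w h)
      have hcw : (x :: xs).count w = (xs.dropWhile (fun y => y == x)).count w := by
        conv_lhs => rw [hsplit]
        rw [List.count_cons, List.count_append, List.count_eq_zero.2 hwtake]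
        simp [Ne.symm hwx]
      have hcountw : (((x :: xs).count w : Int) < min_df)
          ↔ (((xs.dropWhile (fun y => y == x)).count w : Int) < min_df) := by
        rw [hcw]
      have hmemw : w ∈ x :: xs ↔ w ∈ xs.dropWhile (fun y => y == x) := by
        constructor
        · intro h
          rcases List.mem_cons.1 h with h | h
          · exact absurd h hwx
          · rw [hsplit] at h
            rcases List.mem_append.1 h with h | h
            · exact absurd h hwtake
            · exact h
        · intro h
          exact List.mem_cons_of_mem x ((List.dropWhile_sublist _).mem h)
      rw [and_congr hmemw hcountw, List.filter_cons]
      split_ifs with hc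
      · rw [List.map_cons, List.mem_cons, ih hsdrop]
        simp [hwx]
      · exact ih hsdrop

-- ===== VERDICT (by name: the statement is the Claim_ definition above) =====
theorem foldl_append_singleton {α β : Type} (f : α → β) (l : List α) (acc : List β) :
    l.foldl (fun acc s => acc ++ [f s]) acc = acc ++ l.map f := by
  induction l generalizing acc with
  | nil => simp
  | cons x xs ih => simp [ih]

theorem filter_msmp_by_df_spec : Claim_equal_filter_msmp_by_df := by
  intro msmp_raw min_df _
  unfold Spec_filter_msmp_by_df filter_msmp_by_df filter_msmp_by_df_alt
  rw [foldl_append_singleton]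
  simp only [List.nil_append]
  apply List.map_congr_left
  intro s hs
  apply List.filter_congr
  intro mw hmw
  set flat := msmp_raw.flatMap (fun s => s) with hflatdef
  set tokens := PySem.List.sorted flat (fun w => w) false with htok
  have hperm : tokens.Perm flat := PySem.List.sorted_perm flat (fun w => w) false
  have hflat : mw ∈ flat := List.mem_flatMap.2 ⟨s, hs, hmw⟩
  have hgetD := nested_count_getD msmp_raw PySem.Dict.empty mw
  simp only [PySem.Dict.getD_empty, zero_add] at hgetD
  have hpair : tokens.Pairwise (· ≤ ·) := by
    have := PySem.List.sorted_pairwise (xs := flat) (key := fun w => w)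
    simpa using this
  have hrare := runCounts_rare_mem min_df tokens hpair mw
  rw [hperm.count_eq] at hrare
  have hmemtok : mw ∈ tokens := (PySem.List.mem_sorted flat (fun w => w) false mw).2 hflat
  have hiff : (mw ∈ ((pvRunCounts tokens).filter (fun p => p.2 < min_df)).map (·.1))
      ↔ (flat.count mw : Int) < min_df := by
    rw [hrare]; exact ⟨fun h => h.2, fun h => ⟨hmemtok, h⟩⟩
  have hc : PySem.Set.contains
      (PySem.Set.ofList (((pvRunCounts tokens).filter (fun p => p.2 < min_df)).map (·.1))) mw
      = decide ((flat.count mw : Int) < min_df) := by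
    by_cases h : (flat.count mw : Int) < min_df
    · rw [decide_eq_true h]
      exact (PySem.Set.contains_iff _ _).2 (by rw [PySem.Set.mem_ofList]; exact hiff.2 h)
    · rw [decide_eq_false h, ← Bool.not_eq_true]
      intro hct
      exact h (hiff.1 ((PySem.Set.mem_ofList _ _).1 ((PySem.Set.contains_iff _ _).1 hct)))
  rw [hgetD, hc, ← decide_not]
  exact (decide_eq_decide).2 not_lt.symm
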